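-- pv_equiv track=rewrite | github.com/namitk/MsgPassing | utils.py | DFS
-- ===== SOURCE A (Python) =====
-- def DFS(G, root):
--     visited = [False for x in G]
--     dfs = [{'send':[], 'recv':[]} for x in G]
--     stack = [root]
--     while stack:
--         cur = stack.pop()
--         if not visited[cur]:
--             for x in G[cur]:
--                 if not visited[x]:
--                     dfs[x]['send'].append(cur)
--                     dfs[cur]['recv'].append(x)
--                 stack.append(x)
--             visited[cur]=True
--     return dfs
-- ===== SOURCE B (Python) =====
-- def DFS(G, root):
--     visited = [False] * len(G)
--     dfs = [{'send': [], 'recv': []} for _ in G]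
--
--     def visit(cur):
--         if visited[cur]:
--             return
--         for x in G[cur]:
--             if not visited[x]:
--                 dfs[x]['send'].append(cur)
--                 dfs[cur]['recv'].append(x)
--         visited[cur] = True
--         for x in reversed(G[cur]):
--             visit(x)
--
--     visit(root)
--     return dfs
-- ===== Notes on version B (the rewrite author's own statement) =====
-- stated objective: alternative
-- what changed: Replaces the explicit LIFO stack with pop-time visited checks by a recursive visit() helper that records edges over the neighbor list in forward order and then recurses over the reversed neighbor list, matching the stack's pop order.
import Mathlib
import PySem

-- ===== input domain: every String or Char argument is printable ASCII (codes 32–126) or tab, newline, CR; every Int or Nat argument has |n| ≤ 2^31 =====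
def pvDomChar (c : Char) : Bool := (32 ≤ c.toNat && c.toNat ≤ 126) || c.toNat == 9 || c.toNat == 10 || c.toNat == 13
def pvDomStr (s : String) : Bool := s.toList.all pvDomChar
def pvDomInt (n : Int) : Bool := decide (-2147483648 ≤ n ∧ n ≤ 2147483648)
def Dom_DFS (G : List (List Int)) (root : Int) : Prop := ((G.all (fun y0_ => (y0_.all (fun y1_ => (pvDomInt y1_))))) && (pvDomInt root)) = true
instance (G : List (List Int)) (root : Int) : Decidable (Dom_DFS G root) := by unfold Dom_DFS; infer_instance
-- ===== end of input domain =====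

-- B replaces A's explicit LIFO stack (with its pop-time visited checks) by a recursive
-- visit helper (record edges in forward order, then recurse over reversed neighbours);
-- a different decomposition of the same traversal, same asymptotic cost.

-- ===== PORT A =====
-- the fresh {'send': [], 'recv': []} dict, as an insertion-ordered association list
def pvDict0 : List (String × List Int) := [("send", []), ("recv", [])]

-- d[k].append(v) on one such dict (keys are unique, so modifying the first match is exact)
def pvDictApp (d : List (String × List Int)) (k : String) (v : Int) : List (String × List Int) :=
  d.map (fun p => if p.1 == k then (p.1, p.2 ++ [v]) else p)

-- dfs[i][k].append(v); the index i was already range-checked via visited[i] just before,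
-- so the none-branch (IndexError) is unreachable whenever the Python runs this statement
def pvUpd (dfs : List (List (String × List Int))) (i : Int) (k : String) (v : Int) :
    List (List (String × List Int)) :=
  match PySem.List.pyIdx? dfs.length i with
  | some n => dfs.modify n (fun d => pvDictApp d k v)
  | none => dfs

-- the inner 'for x in G[cur]: if not visited[x]: …' recording loop, which is VERBATIM the
-- same in both Pythons (A runs it while pushing, B before recursing); none = IndexError
def pvRecord (vis : List Bool) (cur : Int) (dfs : List (List (String × List Int))) :
    List Int → Option (List (List (String × List Int)))
  | [] => some dfs
  | x :: xs =>
    match PySem.List.pyGet? vis x with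
    | none => none
    | some true => pvRecord vis cur dfs xs
    | some false => pvRecord vis cur (pvUpd (pvUpd dfs x "send" cur) cur "recv" x) xs

theorem pvCountFalse_set_lt (l : List Bool) (k : Nat) (h : l[k]? = some false) :
    (l.set k true).count false < l.count false := by
  induction l generalizing k with
  | nil => simp at h
  | cons a l ih =>
    cases k with
    | zero =>
      simp only [List.getElem?_cons_zero, Option.some.injEq] at h
      subst h
      simp
    | succ k =>
      simp only [List.getElem?_cons_succ] at h
      have := ih k h
      simp only [List.set_cons_succ, List.count_cons]
      omega

-- termination lemma for the while-loop: marking a node the loop just found unvisited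
-- strictly decreases the number of unvisited nodes
theorem pvSet_decr (vis : List Bool) (cur : Int)
    (h : PySem.List.pyGet? vis cur = some false) :
    (PySem.List.pySetD vis cur true).count false < vis.count false := by
  unfold PySem.List.pyGet? at h
  unfold PySem.List.pySetD PySem.List.pySet?
  cases hk : PySem.List.pyIdx? vis.length cur with
  | none => simp [hk] at h
  | some k =>
    simp [hk] at h ⊢
    exact pvCountFalse_set_lt vis k h

-- the while-stack loop of A; the stack is kept top-first (Python appends/pops at the END,
-- here the head is the top), so pushing G[cur] in order leaves nbrs.reverse on top.
-- Every none-branch is a Python exception: the loop result is then unspecified (junk).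
def pvLoopA (G : List (List Int)) (vis : List Bool) (dfs : List (List (String × List Int)))
    (stack : List Int) : List Bool × List (List (String × List Int)) :=
  match stack with
  | [] => (vis, dfs)
  | cur :: rest =>
    match h : PySem.List.pyGet? vis cur with
    | none => (vis, dfs)
    | some true => pvLoopA G vis dfs rest
    | some false =>
      match PySem.List.pyGet? G cur with
      | none => (vis, dfs)
      | some nbrs =>
        match pvRecord vis cur dfs nbrs with
        | none => (vis, dfs)
        | some dfs' => pvLoopA G (PySem.List.pySetD vis cur true) dfs' (nbrs.reverse ++ rest)
termination_by (vis.count false, stack.length)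
decreasing_by
  · exact Prod.Lex.right _ (by simp)
  · exact Prod.Lex.left _ _ (pvSet_decr vis cur h)

def DFS (G : List (List Int)) (root : Int) : List (List (String × List Int)) :=
  (pvLoopA G (G.map (fun _ => false)) (G.map (fun _ => pvDict0)) [root]).2

-- ===== PORT B =====
-- recursive visit(cur) of Source B; fuel only bounds the recursion DEPTH, which never exceeds
-- the number of nodes + 1 (each nested call sees one more visited node) — a totality
-- guard, not an algorithm change
def pvVisit (G : List (List Int)) :
    Nat → List Bool × List (List (String × List Int)) → Int →
    List Bool × List (List (String × List Int))
  | 0, st, _ => st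
  | fuel + 1, (vis, dfs), cur =>
    match PySem.List.pyGet? vis cur with
    | some false =>
      match PySem.List.pyGet? G cur with
      | some nbrs =>
        match pvRecord vis cur dfs nbrs with
        | some dfs1 =>
          nbrs.reverse.foldl (fun st x => pvVisit G fuel st x) (PySem.List.pySetD vis cur true, dfs1)
        | none => (vis, dfs)
      | none => (vis, dfs)
    | _ => (vis, dfs)

def DFS_alt (G : List (List Int)) (root : Int) : List (List (String × List Int)) :=
  (pvVisit G (G.length + 1) (G.map (fun _ => false), G.map (fun _ => pvDict0)) root).2

-- ===== PRECONDITION & SPEC =====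
-- Pre_ excludes inputs where A raises IndexError (root or a reached neighbour out of
-- range, Python's negative in-range indices wrap and are admitted); to stay closed-form
-- it is stated a little more strictly: it also excludes out-of-range entries sitting in
-- rows the traversal never reaches (on which A returns; see the cite).
def Pre_DFS (G : List (List Int)) (root : Int) : Prop :=
  -(G.length : Int) ≤ root ∧ root < (G.length : Int) ∧
    ∀ row ∈ G, ∀ x ∈ row, -(G.length : Int) ≤ x ∧ x < (G.length : Int)

instance (G : List (List Int)) (root : Int) : Decidable (Pre_DFS G root) := by
  unfold Pre_DFS; infer_instance

def pvWitness_DFS : List (List Int) × Int := ([[1, 2], [2, 0], [0]], 0)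

def Spec_DFS (G : List (List Int)) (root : Int) (out : List (List (String × List Int))) : Prop :=
  out = DFS_alt G root
instance (G : List (List Int)) (root : Int) (out : List (List (String × List Int))) : Decidable (Spec_DFS G root out) := by unfold Spec_DFS; infer_instance

-- ===== CLAIM (what is proved, stated in full; the proofs are below) =====
def Claim_equal_DFS : Prop := ∀ (G : List (List Int)) (root : Int), Dom_DFS G root → Pre_DFS G root → Spec_DFS G root (DFS G root)

-- ===== LEMMAS AND PROOFS =====

-- an in-range Python index normalizes to a valid Nat index
theorem pvIdx_some {n : Nat} {i : Int} (h0 : -(n : Int) ≤ i) (h1 : i < (n : Int)) :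
    ∃ k, PySem.List.pyIdx? n i = some k ∧ k < n := by
  unfold PySem.List.pyIdx?
  by_cases ha : 0 ≤ i
  · refine ⟨i.toNat, ?_, by omega⟩
    simp [ha, h1]
  · refine ⟨n - (-i).toNat, ?_, by omega⟩
    simp [ha, h0]

theorem pvCountFalse_set_le (l : List Bool) (k : Nat) :
    (l.set k true).count false ≤ l.count false := by
  induction l generalizing k with
  | nil => simp
  | cons a l ih =>
    cases k with
    | zero => cases a <;> simp
    | succ k =>
      simp only [List.set_cons_succ, List.count_cons]
      have := ih k
      omega

theorem pvSetD_cnt_le (vis : List Bool) (cur : Int) :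
    (PySem.List.pySetD vis cur true).count false ≤ vis.count false := by
  unfold PySem.List.pySetD PySem.List.pySet?
  cases hk : PySem.List.pyIdx? vis.length cur with
  | none => simp
  | some k => simp [pvCountFalse_set_le]

-- visiting never increases the number of unvisited nodes
theorem pvVisit_cnt_le (G : List (List Int)) :
    ∀ (fuel : Nat) (st : List Bool × List (List (String × List Int))) (x : Int),
      (pvVisit G fuel st x).1.count false ≤ st.1.count false := by
  intro fuel
  induction fuel with
  | zero => intro st x; simp [pvVisit]
  | succ f ih =>
    have hfold : ∀ (l : List Int) (st0 : List Bool × List (List (String × List Int))),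
        (l.foldl (fun st y => pvVisit G f st y) st0).1.count false ≤ st0.1.count false := by
      intro l
      induction l with
      | nil => intro st0; simp
      | cons y l ihl =>
        intro st0
        simp only [List.foldl_cons]
        exact le_trans (ihl _) (ih st0 y)
    intro st x
    obtain ⟨vis, dfs⟩ := st
    cases hv : PySem.List.pyGet? vis x with
    | none => simp [pvVisit, hv]
    | some b =>
      cases b with
      | true => simp [pvVisit, hv]
      | false =>
        cases hg : PySem.List.pyGet? G x with
        | none => simp [pvVisit, hv, hg]
        | some nbrs =>
          cases hr : pvRecord vis x dfs nbrs with
          | none => simp [pvVisit, hv, hg, hr]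
          | some dfs1 =>
            simp only [pvVisit, hv, hg, hr]
            exact le_trans (hfold _ _) (pvSetD_cnt_le vis x)

-- any two sufficient fuels give the same result
theorem pvVisit_fuel_congr (G : List (List Int)) :
    ∀ (f g : Nat) (st : List Bool × List (List (String × List Int))) (x : Int),
      st.1.count false < f → st.1.count false < g →
      pvVisit G f st x = pvVisit G g st x := by
  intro f
  induction f with
  | zero => intro g st x hf _; omega
  | succ f ih =>
    intro g st x hf hg
    obtain ⟨g, rfl⟩ : ∃ g', g = g' + 1 := ⟨g - 1, by omega⟩
    obtain ⟨vis, dfs⟩ := st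
    simp only at hf hg
    cases hv : PySem.List.pyGet? vis x with
    | none => simp [pvVisit, hv]
    | some b =>
      cases b with
      | true => simp [pvVisit, hv]
      | false =>
        cases hg2 : PySem.List.pyGet? G x with
        | none => simp [pvVisit, hv, hg2]
        | some nbrs =>
          cases hr : pvRecord vis x dfs nbrs with
          | none => simp [pvVisit, hv, hg2, hr]
          | some dfs1 =>
            simp only [pvVisit, hv, hg2, hr]
            have hdec := pvSet_decr vis x hv
            have hfold : ∀ (l : List Int) (st0 : List Bool × List (List (String × List Int))),
                st0.1.count false < f → st0.1.count false < g →
                l.foldl (fun st y => pvVisit G f st y) st0 =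
                l.foldl (fun st y => pvVisit G g st y) st0 := by
              intro l
              induction l with
              | nil => intro st0 _ _; rfl
              | cons y l ihl =>
                intro st0 h1 h2
                simp only [List.foldl_cons]
                have hy := ih g st0 y h1 h2
                rw [hy]
                have hle := pvVisit_cnt_le G f st0 y
                rw [hy] at hle
                exact ihl _ (by omega) (by omega)
            refine hfold _ _ ?_ ?_
            · show (PySem.List.pySetD vis x true).count false < f
              omega
            · show (PySem.List.pySetD vis x true).count false < g
              omega

-- the recording loop never raises when every neighbour is in range
theorem pvRecord_some (vis : List Bool) (cur : Int) (dfs : List (List (String × List Int)))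
    (nbrs : List Int) (h : ∀ x ∈ nbrs, -(vis.length : Int) ≤ x ∧ x < (vis.length : Int)) :
    ∃ d', pvRecord vis cur dfs nbrs = some d' := by
  induction nbrs generalizing dfs with
  | nil => exact ⟨dfs, rfl⟩
  | cons x xs ih =>
    have hx := h x (by simp)
    obtain ⟨k, hk, hkn⟩ := pvIdx_some hx.1 hx.2
    have hv0 : PySem.List.pyGet? vis x = vis[k]? := by
      simp [PySem.List.pyGet?, hk]
    have h' : ∀ y ∈ xs, -(vis.length : Int) ≤ y ∧ y < (vis.length : Int) :=
      fun y hy => h y (by simp [hy])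
    cases hb : vis[k]? with
    | none =>
      rw [List.getElem?_eq_none_iff] at hb
      omega
    | some b =>
      rw [hb] at hv0
      cases b with
      | true =>
        unfold pvRecord
        rw [hv0]
        exact ih _ h'
      | false =>
        unfold pvRecord
        rw [hv0]
        exact ih _ h'

-- THE BRIDGE: running A's stack loop equals folding B's visit over the stack top-first
theorem pvMain (G : List (List Int))
    (hG : ∀ row ∈ G, ∀ x ∈ row, -(G.length : Int) ≤ x ∧ x < (G.length : Int)) :
    ∀ (fuel : Nat) (stack : List Int) (vis : List Bool)
      (dfs : List (List (String × List Int))),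
      vis.length = G.length →
      (∀ c ∈ stack, -(G.length : Int) ≤ c ∧ c < (G.length : Int)) →
      vis.count false < fuel →
      pvLoopA G vis dfs stack =
        stack.foldl (fun st x => pvVisit G fuel st x) (vis, dfs) := by
  intro fuel
  induction fuel with
  | zero => intro stack vis dfs _ _ h; omega
  | succ f ihf =>
    intro stack
    induction stack with
    | nil => intro vis dfs _ _ _; simp [pvLoopA]
    | cons cur rest ihs =>
      intro vis dfs hlen hst hcnt
      have hc := hst cur (by simp)
      obtain ⟨k, hk, hkn⟩ := pvIdx_some hc.1 hc.2
      have hkv : PySem.List.pyIdx? vis.length cur = some k := by rw [hlen]; exact hk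
      have hv0 : PySem.List.pyGet? vis cur = vis[k]? := by
        simp [PySem.List.pyGet?, hkv]
      have hrest : ∀ c ∈ rest, -(G.length : Int) ≤ c ∧ c < (G.length : Int) :=
        fun c h => hst c (by simp [h])
      simp only [List.foldl_cons]
      cases hb : vis[k]? with
      | none =>
        rw [List.getElem?_eq_none_iff] at hb
        omega
      | some b =>
        rw [hb] at hv0
        cases b with
        | true =>
          have hLA : pvLoopA G vis dfs (cur :: rest) = pvLoopA G vis dfs rest := by
            rw [pvLoopA, hv0]
          have hVB : pvVisit G (f + 1) (vis, dfs) cur = (vis, dfs) := by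
            simp [pvVisit, hv0]
          rw [hLA, hVB]
          exact ihs vis dfs hlen hrest hcnt
        | false =>
          have hgg : PySem.List.pyGet? G cur = some G[k] := by
            simp [PySem.List.pyGet?, hk, List.getElem?_eq_getElem hkn]
          have hmem : G[k] ∈ G := List.getElem_mem hkn
          have hnb : ∀ x ∈ G[k], -(vis.length : Int) ≤ x ∧ x < (vis.length : Int) := by
            rw [hlen]; exact hG _ hmem
          obtain ⟨dfs1, hr⟩ := pvRecord_some vis cur dfs G[k] hnb
          have hdec : (PySem.List.pySetD vis cur true).count false < vis.count false :=
            pvSet_decr vis cur hv0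
          have hlen1 : (PySem.List.pySetD vis cur true).length = G.length := by
            rw [PySem.List.length_pySetD]; exact hlen
          have hstk1 : ∀ c ∈ G[k].reverse ++ rest,
              -(G.length : Int) ≤ c ∧ c < (G.length : Int) := by
            intro c hcm
            rcases List.mem_append.1 hcm with h1 | h2
            · exact hG _ hmem c (List.mem_reverse.1 h1)
            · exact hrest c h2
          have hLA : pvLoopA G vis dfs (cur :: rest) =
              pvLoopA G (PySem.List.pySetD vis cur true) dfs1 (G[k].reverse ++ rest) := by
            rw [pvLoopA, hv0, hgg]
            dsimp only
            rw [hr]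
          have hVB : pvVisit G (f + 1) (vis, dfs) cur =
              G[k].reverse.foldl (fun st x => pvVisit G f st x)
                (PySem.List.pySetD vis cur true, dfs1) := by
            simp only [pvVisit, hv0, hgg, hr]
          rw [hLA, hVB]
          rw [ihf (G[k].reverse ++ rest) (PySem.List.pySetD vis cur true) dfs1
              hlen1 hstk1 (by omega)]
          rw [List.foldl_append]
          -- bump the fuel of the fold over rest from f to f + 1
          have hXc : (G[k].reverse.foldl (fun st x => pvVisit G f st x)
              (PySem.List.pySetD vis cur true, dfs1)).1.count false < f := by
            have hm : ∀ (l : List Int) (st0 : List Bool × List (List (String × List Int))),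
                (l.foldl (fun st y => pvVisit G f st y) st0).1.count false ≤ st0.1.count false := by
              intro l
              induction l with
              | nil => intro st0; simp
              | cons y l ihl =>
                intro st0
                simp only [List.foldl_cons]
                exact le_trans (ihl _) (pvVisit_cnt_le G f st0 y)
            have h1 := hm G[k].reverse (PySem.List.pySetD vis cur true, dfs1)
            simp only at h1
            omega
          have hfold : ∀ (l : List Int) (st0 : List Bool × List (List (String × List Int))),
              st0.1.count false < f →
              l.foldl (fun st y => pvVisit G f st y) st0 =
              l.foldl (fun st y => pvVisit G (f + 1) st y) st0 := by
            intro l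
            induction l with
            | nil => intro st0 _; rfl
            | cons y l ihl =>
              intro st0 h0
              simp only [List.foldl_cons]
              have hy := pvVisit_fuel_congr G f (f + 1) st0 y h0 (by omega)
              rw [hy]
              have hle := pvVisit_cnt_le G f st0 y
              rw [hy] at hle
              exact ihl _ (by omega)
          rw [hfold rest _ hXc]

-- ===== VERDICT (by name: the statement is the Claim_ definition above) =====
theorem DFS_spec : Claim_equal_DFS := by
  intro G root _ hpre
  unfold Spec_DFS DFS DFS_alt
  obtain ⟨h0, h1, hG⟩ := hpre
  have hcnt : (G.map (fun _ => false)).count false = G.length := by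
    rw [List.map_const', List.count_replicate_self]
  rw [pvMain G hG (G.length + 1) [root] (G.map (fun _ => false)) (G.map (fun _ => pvDict0))
      (by simp) (by intro c hc; simp at hc; subst hc; exact ⟨h0, h1⟩) (by omega)]
  rfl
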